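-- pv_equiv track=rewrite | github.com/zinh/Advent-of-Code-2021 | day03/main.py | count_bit
-- ===== SOURCE A (Python) =====
-- def count_bit(numbers, position):
--     # return count of 0, 1 at a position
--     counts = [0, 0]
--     mask = 1 << position
--     for number in numbers:
--         if number & mask == 0:
--             counts[0] += 1
--         else:
--             counts[1] += 1
--     return counts
-- ===== SOURCE B (Python) =====
-- def count_bit(numbers, position):
--     # return count of 0, 1 at a position -- divide and conquer:
--     # split the list in half, count each half recursively, add the results.
--     n = len(numbers)
--     if n == 0:
--         return [0, 0]
--     if n == 1:
--         if numbers[0] & (1 << position) == 0: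
--             return [1, 0]
--         return [0, 1]
--     mid = n // 2
--     left = count_bit(numbers[:mid], position)
--     right = count_bit(numbers[mid:], position)
--     return [left[0] + right[0], left[1] + right[1]]
-- ===== Notes on version B (the rewrite author's own statement) =====
-- stated objective: alternative
-- what changed: B counts by divide and conquer: it recursively splits the list into halves, counts each half, and adds the two partial count pairs, instead of A's single linear loop updating a mutable two-slot counter.
-- outside the precondition, e.g. on count_bit([1, 2], -1): A raises ValueError, B raises ValueError
import Mathlib
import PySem

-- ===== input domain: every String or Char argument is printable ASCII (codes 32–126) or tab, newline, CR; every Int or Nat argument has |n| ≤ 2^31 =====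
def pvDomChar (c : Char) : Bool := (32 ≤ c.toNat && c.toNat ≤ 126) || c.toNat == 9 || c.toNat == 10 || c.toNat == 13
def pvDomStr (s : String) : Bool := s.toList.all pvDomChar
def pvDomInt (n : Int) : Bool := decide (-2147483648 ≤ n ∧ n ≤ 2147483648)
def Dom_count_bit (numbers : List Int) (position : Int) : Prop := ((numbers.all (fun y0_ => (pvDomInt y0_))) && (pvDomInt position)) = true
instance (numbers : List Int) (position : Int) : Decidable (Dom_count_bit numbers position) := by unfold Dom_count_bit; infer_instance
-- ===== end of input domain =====

-- B replaces A's linear two-counter loop by divide and conquer: split the list in half,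
-- count each half recursively, add the two partial count pairs (alternative decomposition).

-- ===== PORT A =====
def count_bit (numbers : List Int) (position : Int) : List Int :=
  let mask : Int := 1 <<< position.toNat
  let counts : Int × Int :=
    numbers.foldl
      (fun (counts : Int × Int) number =>
        if PySem.Int.band number mask = 0 then (counts.1 + 1, counts.2)
        else (counts.1, counts.2 + 1))
      (0, 0)
  [counts.1, counts.2]

-- ===== PORT B =====
-- n // 2 with n = len(numbers) ≥ 0 is ported as Nat division (exact for nonnegative operands).
def count_bit_alt (numbers : List Int) (position : Int) : List Int :=
  if numbers.length = 0 then [0, 0]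
  else if numbers.length = 1 then
    if PySem.Int.band (PySem.List.pyGetD numbers 0 0) ((1 : Int) <<< position.toNat) = 0 then [1, 0]
    else [0, 1]
  else
    let mid : Nat := numbers.length / 2
    let left := count_bit_alt (PySem.List.slice numbers none (some (mid : Int))) position
    let right := count_bit_alt (PySem.List.slice numbers (some (mid : Int)) none) position
    [PySem.List.pyGetD left 0 0 + PySem.List.pyGetD right 0 0,
     PySem.List.pyGetD left 1 0 + PySem.List.pyGetD right 1 0]
termination_by numbers.length
decreasing_by
  · rw [PySem.List.slice_to_natCast]; simp only [List.length_take]; omega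
  · rw [PySem.List.slice_from_natCast]; simp only [List.length_drop]; omega

-- ===== PRECONDITION & SPEC =====
-- Pre_ excludes negative positions, on which Python's 1 << position raises ValueError.
def Pre_count_bit (numbers : List Int) (position : Int) : Prop := 0 ≤ position
instance (numbers : List Int) (position : Int) : Decidable (Pre_count_bit numbers position) := by unfold Pre_count_bit; infer_instance
def pvWitness_count_bit : List Int × Int := ([5, 2, 3], 1)
def Spec_count_bit (numbers : List Int) (position : Int) (out : List Int) : Prop := out = count_bit_alt numbers position
instance (numbers : List Int) (position : Int) (out : List Int) : Decidable (Spec_count_bit numbers position out) := by unfold Spec_count_bit; infer_instance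

-- ===== CLAIM (what is proved, stated in full; the proofs are below) =====
def Claim_equal_count_bit : Prop := ∀ (numbers : List Int) (position : Int), Dom_count_bit numbers position → Pre_count_bit numbers position → Spec_count_bit numbers position (count_bit numbers position)

-- ===== LEMMAS AND PROOFS =====
theorem count_bit_fold_char (mask : Int) (l : List Int) : ∀ (c0 c1 : Int),
    l.foldl
      (fun (counts : Int × Int) number =>
        if PySem.Int.band number mask = 0 then (counts.1 + 1, counts.2)
        else (counts.1, counts.2 + 1))
      (c0, c1)
    = (c0 + ((l.filter (fun n => PySem.Int.band n mask = 0)).length : Int),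
       c1 + ((l.filter (fun n => ¬ PySem.Int.band n mask = 0)).length : Int)) := by
  induction l with
  | nil => intro c0 c1; simp
  | cons x xs ih =>
    intro c0 c1
    by_cases h : PySem.Int.band x mask = 0 <;>
      simp [h, List.foldl_cons, ih] <;> ring

-- characterisation of B's divide-and-conquer result, by strong induction on length
theorem count_bit_alt_char (position : Int) (l : List Int) :
    count_bit_alt l position
      = [((l.filter (fun n => PySem.Int.band n ((1 : Int) <<< position.toNat) = 0)).length : Int),
         ((l.filter (fun n => ¬ PySem.Int.band n ((1 : Int) <<< position.toNat) = 0)).length : Int)] := by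
  induction hn : l.length using Nat.strong_induction_on generalizing l with
  | _ n ih =>
    rw [count_bit_alt]
    by_cases h0 : l.length = 0
    · rcases List.length_eq_zero_iff.mp h0 with rfl
      simp
    · by_cases h1 : l.length = 1
      · rcases List.length_eq_one_iff.mp h1 with ⟨x, rfl⟩
        by_cases hb : PySem.Int.band x ((1 : Int) <<< position.toNat) = 0 <;>
          simp [h1, hb, PySem.List.pyGetD_zero_cons]
      · have hlen : 2 ≤ l.length := by omega
        have hmid1 : 1 ≤ l.length / 2 := by omega
        rw [if_neg h0, if_neg h1]
        dsimp only
        rw [PySem.List.slice_to_natCast, PySem.List.slice_from_natCast]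
        rw [ih (l.length / 2) (by omega) _ (by simp only [List.length_take]; omega),
            ih (l.length - l.length / 2) (by omega) _ (by simp only [List.length_drop])]
        have hsplit : l = l.take (l.length / 2) ++ l.drop (l.length / 2) :=
          (List.take_append_drop _ _).symm
        simp only [PySem.List.pyGetD_ofNat']
        norm_num [List.getD_cons_zero, List.getD_cons_succ]
        constructor
        · conv_rhs => rw [hsplit]
          simp only [List.filter_append, List.length_append]
          push_cast; ring
        · conv_rhs => rw [hsplit]
          simp only [List.filter_append, List.length_append]
          push_cast; ring

-- ===== VERDICT (by name: the statement is the Claim_ definition above) =====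
theorem count_bit_spec : Claim_equal_count_bit := by
  intro numbers position _ _
  unfold Spec_count_bit count_bit
  rw [count_bit_alt_char]
  simp only [count_bit_fold_char]
  simp
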